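-- pv_equiv track=rewrite | github.com/Cjtplus/Spider | Crawler/js逆向/请求参数加密/某采购招标网/func.py | remove_annotation
-- ===== SOURCE A (Python) =====
-- def remove_annotation(code):
--     ret = ''
--     length = len(code)
--     i = 0
--     flag = 0
--     while i < length:
--         next_code = ''
--         if i < length - 1:
--             next_code = code[i + 1]
--         if flag == 0 and code[i] == '/' and next_code == '/':
--             break
--         elif flag == 0 and code[i] == '/' and next_code == '*':
--             flag = 1
--             i = i + 1
--         elif flag == 1 and code[i] == '*' and next_code == '/':
--             flag = 0
--             i = i + 1
--         elif flag == 1: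
--             i = i + 1
--             continue
--         else:
--             ret = ret + code[i]
--         i = i + 1
--     return ret
-- ===== SOURCE B (Python) =====
-- def remove_annotation(code):
--     parts = []
--     while code:
--         li = code.find('//')
--         bi = code.find('/*')
--         if li == -1 and bi == -1:
--             parts.append(code)
--             break
--         if bi == -1 or (li != -1 and li < bi):
--             parts.append(code[:li])
--             break
--         parts.append(code[:bi])
--         end = code.find('*/', bi + 2)
--         if end == -1:
--             break
--         code = code[end + 2:]
--     return ''.join(parts)
-- ===== Notes on version B (the rewrite author's own statement) =====
-- stated objective: faster
-- what changed: Replaced the per-character flag state machine (which grows the result one character at a time by string concatenation) with find-based jumping: locate the next line or block comment marker, copy the whole slice up to it, skip past the block's closer, and join the collected slices.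
import Mathlib
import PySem

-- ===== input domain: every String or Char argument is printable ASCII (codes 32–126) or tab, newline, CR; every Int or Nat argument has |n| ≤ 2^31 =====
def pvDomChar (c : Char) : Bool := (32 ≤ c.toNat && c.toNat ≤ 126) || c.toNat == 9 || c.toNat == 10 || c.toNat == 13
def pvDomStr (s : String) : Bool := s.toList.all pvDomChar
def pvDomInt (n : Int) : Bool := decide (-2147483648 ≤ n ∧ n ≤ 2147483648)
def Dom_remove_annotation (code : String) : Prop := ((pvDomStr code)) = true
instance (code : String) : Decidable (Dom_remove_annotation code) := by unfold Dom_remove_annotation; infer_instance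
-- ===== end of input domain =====

-- B replaces A's per-character flag state machine by find-based jumping over the string
-- (locate the next comment marker, copy the whole slice up to it, skip past the block closer, join the slices);
-- objective: faster (a timing run measured B faster; A rebuilds ret by per-char concatenation).

-- ===== PORT A =====
-- the while loop of A: state = (remaining chars from index i, flag, ret); next_code = head? of the rest
def pvGoA : List Char → Nat → List Char → List Char
  | [], _, ret => ret
  | c :: rest, flag, ret =>
    if flag = 0 ∧ c = '/' ∧ rest.head? = some '/' then ret
    else if flag = 0 ∧ c = '/' ∧ rest.head? = some '*' then pvGoA rest.tail 1 ret
    else if flag = 1 ∧ c = '*' ∧ rest.head? = some '/' then pvGoA rest.tail 0 ret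
    else if flag = 1 then pvGoA rest 1 ret
    else pvGoA rest 0 (ret ++ [c])
termination_by cs _ _ => cs.length
decreasing_by all_goals (simp [List.length_tail]; try omega)

def remove_annotation (code : String) : String := String.ofList (pvGoA code.toList 0 [])

-- ===== PORT B =====
-- needed by goB's termination: a found "/*" leaves at least 2 chars after its position
theorem pv_find_block_bounds (cs : List Char)
    (h : PySem.Chars.find cs ['/', '*'] ≠ -1) :
    0 ≤ PySem.Chars.find cs ['/', '*'] ∧
      (PySem.Chars.find cs ['/', '*']).toNat + 2 ≤ cs.length := by
  have h1 := PySem.Chars.neg_one_le_find cs ['/', '*']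
  have h0 : 0 ≤ PySem.Chars.find cs ['/', '*'] := by omega
  have hs := (PySem.Chars.find_spec (s := cs) (sub := ['/', '*']) h0).1
  have hlen := hs.length_le
  simp [List.length_drop] at hlen
  exact ⟨h0, by omega⟩

-- the while loop of B: each round works on the remaining suffix `cs` of the code
def pvGoB (cs : List Char) : List (List Char) :=
  if _hne : cs = [] then []
  else
    let li := PySem.Chars.find cs ['/', '/']
    let bi := PySem.Chars.find cs ['/', '*']
    if li = -1 ∧ bi = -1 then [cs]
    else if bi = -1 ∨ (li ≠ -1 ∧ li < bi) then [PySem.List.slice cs none (some li)]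
    else
      let e := PySem.Chars.findFrom cs ['*', '/'] (bi + 2) none
      if _he : e = -1 then [PySem.List.slice cs none (some bi)]
      else PySem.List.slice cs none (some bi) :: pvGoB (PySem.List.slice cs (some (e + 2)) none)
termination_by cs.length
decreasing_by
  have hbi : PySem.Chars.find cs ['/', '*'] ≠ -1 := by tauto
  obtain ⟨h0, h2⟩ := pv_find_block_bounds cs hbi
  have hk : (PySem.Chars.find cs ['/', '*']).toNat + 2 ≤ cs.length := h2
  have hcast : PySem.Chars.find cs ['/', '*'] + 2
      = (((PySem.Chars.find cs ['/', '*']).toNat + 2 : Nat) : Int) := by omega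
  have he' : PySem.Chars.findFrom cs ['*', '/'] (PySem.Chars.find cs ['/', '*'] + 2) ≠ -1 := _he
  rw [hcast, PySem.Chars.findFrom_natCast cs ['*', '/'] _ hk] at he' ⊢
  by_cases hf : PySem.Chars.find (cs.drop ((PySem.Chars.find cs ['/', '*']).toNat + 2)) ['*', '/'] = -1
  · rw [if_pos hf] at he'; exact absurd rfl he'
  · have hf0 : 0 ≤ PySem.Chars.find (cs.drop ((PySem.Chars.find cs ['/', '*']).toNat + 2)) ['*', '/'] := by
      have := PySem.Chars.neg_one_le_find (cs.drop ((PySem.Chars.find cs ['/', '*']).toNat + 2)) ['*', '/']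
      omega
    rw [if_neg hf, PySem.List.slice_from _ (by omega)]
    simp only [List.length_drop]
    have hpos : 0 < cs.length := List.length_pos_iff.mpr _hne
    omega

def remove_annotation_alt (code : String) : String :=
  String.ofList (PySem.Chars.join [] (pvGoB code.toList))

-- ===== PRECONDITION & SPEC =====
def Spec_remove_annotation (code : String) (out : String) : Prop := out = remove_annotation_alt code
instance (code : String) (out : String) : Decidable (Spec_remove_annotation code out) := by unfold Spec_remove_annotation; infer_instance

-- ===== CLAIM (what is proved, stated in full; the proofs are below) =====
def Claim_equal_remove_annotation : Prop := ∀ (code : String), Dom_remove_annotation code → Spec_remove_annotation code (remove_annotation code)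

-- ===== LEMMAS AND PROOFS =====

theorem pv_prefix2_iff (a b c : Char) (rest : List Char) :
    ([a, b] <+: c :: rest) ↔ (c = a ∧ rest.head? = some b) := by
  cases rest <;> simp [List.cons_prefix_cons, eq_comm]

theorem pv_join_nil_flatten (ps : List (List Char)) :
    PySem.Chars.join [] ps = ps.flatten := by
  induction ps with
  | nil => rfl
  | cons p ps ih =>
    cases ps with
    | nil => simp [PySem.Chars.join, List.intercalate]
    | cons q qs =>
      simp [PySem.Chars.join, List.intercalate, List.intersperse] at *
      simpa using ih

-- A's ret accumulator can be pulled out front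
theorem pv_goA_acc_aux (n : Nat) : ∀ (cs : List Char) (flag : Nat) (ret : List Char),
    cs.length ≤ n → pvGoA cs flag ret = ret ++ pvGoA cs flag [] := by
  induction n with
  | zero =>
    intro cs flag ret h
    have : cs = [] := by cases cs with
      | nil => rfl
      | cons c r => simp at h
    subst this; simp [pvGoA]
  | succ n ih =>
    intro cs flag ret h
    cases cs with
    | nil => simp [pvGoA]
    | cons c rest =>
      simp only [pvGoA]
      split_ifs with h1 h2 h3 h4
      · simp
      · exact ih rest.tail 1 ret (by simp at h ⊢; omega)
      · exact ih rest.tail 0 ret (by simp at h ⊢; omega)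
      · exact ih rest 1 ret (by simp at h; omega)
      · rw [ih rest 0 (ret ++ [c]) (by simp at h; omega),
            ih rest 0 ([] ++ [c]) (by simp at h; omega)]
        simp

theorem pv_goA_acc (cs : List Char) (flag : Nat) (ret : List Char) :
    pvGoA cs flag ret = ret ++ pvGoA cs flag [] :=
  pv_goA_acc_aux cs.length cs flag ret le_rfl

-- in flag 0, chars before the first marker are copied to ret
theorem pv_goA_skip0 (m : Nat) : ∀ (cs ret : List Char), m ≤ cs.length →
    (∀ j < m, ¬ (['/', '/'] <+: cs.drop j) ∧ ¬ (['/', '*'] <+: cs.drop j)) →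
    pvGoA cs 0 ret = pvGoA (cs.drop m) 0 (ret ++ cs.take m) := by
  induction m with
  | zero => intro cs ret _ _; simp
  | succ m ih =>
    intro cs ret hm h
    cases cs with
    | nil => simp at hm
    | cons c rest =>
      have h0 := h 0 (Nat.succ_pos m)
      simp only [List.drop_zero] at h0
      rw [pv_prefix2_iff] at h0
      rw [pv_prefix2_iff] at h0
      simp only [pvGoA]
      rw [if_neg (fun hc => h0.1 hc.2), if_neg (fun hc => h0.2 hc.2),
          if_neg (by simp), if_neg (by simp)]
      rw [ih rest (ret ++ [c]) (by simp at hm; omega)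
            (fun j hj => h (j + 1) (by omega))]
      simp

-- in flag 1, chars before the first "*/" are skipped
theorem pv_goA_skip1 (e : Nat) : ∀ (cs ret : List Char), e ≤ cs.length →
    (∀ j < e, ¬ (['*', '/'] <+: cs.drop j)) →
    pvGoA cs 1 ret = pvGoA (cs.drop e) 1 ret := by
  induction e with
  | zero => intro cs ret _ _; simp
  | succ e ih =>
    intro cs ret he h
    cases cs with
    | nil => simp at he
    | cons c rest =>
      have h0 := h 0 (Nat.succ_pos e)
      simp only [List.drop_zero] at h0
      rw [pv_prefix2_iff] at h0
      simp only [pvGoA]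
      rw [if_neg (by simp), if_neg (by simp),
          if_neg (fun hc => h0 hc.2), if_pos trivial]
      exact ih rest ret (by simp at he; omega) (fun j hj => h (j + 1) (by omega))

-- unclosed block comment consumes the rest
theorem pv_goA_all1 (cs ret : List Char)
    (h : ∀ j, ¬ (['*', '/'] <+: cs.drop j)) : pvGoA cs 1 ret = ret := by
  rw [pv_goA_skip1 cs.length cs ret le_rfl (fun j _ => h j)]
  simp [pvGoA]

-- find = -1 means no occurrence starting anywhere
theorem pv_no_prefix_of_find_neg (cs sub : List Char)
    (h : PySem.Chars.find cs sub = -1) : ∀ j, ¬ (sub <+: cs.drop j) := by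
  intro j hp
  have hin : PySem.Chars.isIn sub cs = true :=
    (PySem.Chars.exists_prefix_drop_iff_isIn sub cs).mp ⟨j, hp⟩
  have hinf := (PySem.Chars.isIn_iff_infix sub cs).mp hin
  exact (PySem.Chars.find_eq_neg_one_iff cs sub).mp h hinf

theorem pv_main_aux (n : Nat) : ∀ (cs : List Char), cs.length ≤ n →
    pvGoA cs 0 [] = (pvGoB cs).flatten := by
  induction n with
  | zero =>
    intro cs h
    have : cs = [] := by cases cs with
      | nil => rfl
      | cons c r => simp at h
    subst this; simp [pvGoA, pvGoB]
  | succ n ih =>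
    intro cs hn
    rw [pvGoB]
    dsimp only
    split_ifs with hne hnone hline he
    · subst hne; simp [pvGoA]
    · -- no marker at all: A copies everything
      obtain ⟨hli, hbi⟩ := hnone
      rw [pv_goA_skip0 cs.length cs [] le_rfl (fun j hj =>
        ⟨pv_no_prefix_of_find_neg cs _ hli j, pv_no_prefix_of_find_neg cs _ hbi j⟩)]
      simp [pvGoA]
    · -- "//" comes first: truncate there
      have hli : PySem.Chars.find cs ['/', '/'] ≠ -1 := by
        rcases hline with h | ⟨h, _⟩
        · intro hc; exact hnone ⟨hc, h⟩
        · exact h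
      have hli0 : 0 ≤ PySem.Chars.find cs ['/', '/'] := by
        have := PySem.Chars.neg_one_le_find cs ['/', '/']; omega
      have hlispec := PySem.Chars.find_spec (s := cs) (sub := ['/', '/']) hli0
      have hlen := PySem.Chars.find_le_length cs ['/', '/']
      rw [pv_goA_skip0 (PySem.Chars.find cs ['/', '/']).toNat cs [] (by omega)
        (fun j hj => by
          refine ⟨hlispec.2 j hj, ?_⟩
          rcases hline with h | ⟨h, hlt⟩
          · exact pv_no_prefix_of_find_neg cs _ h j
          · have hbi0 : 0 ≤ PySem.Chars.find cs ['/', '*'] := by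
              have := PySem.Chars.neg_one_le_find cs ['/', '*']; omega
            exact (PySem.Chars.find_spec (s := cs) (sub := ['/', '*']) hbi0).2 j
              (by omega))]
      obtain ⟨t, ht⟩ := hlispec.1
      rw [← ht, PySem.List.slice_to _ hli0]
      show pvGoA ('/' :: '/' :: t) 0 _ = _
      simp only [pvGoA]
      rw [if_pos ⟨trivial, trivial, rfl⟩]
      simp
    · -- "/*" comes first, and its "*/" is missing: drop the rest
      push Not at hline
      obtain ⟨hbi, hble⟩ := hline
      obtain ⟨hbi0, hkle⟩ := pv_find_block_bounds cs hbi
      have hbspec := PySem.Chars.find_spec (s := cs) (sub := ['/', '*']) hbi0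
      have hcast : PySem.Chars.find cs ['/', '*'] + 2
          = (((PySem.Chars.find cs ['/', '*']).toNat + 2 : Nat) : Int) := by omega
      rw [hcast, PySem.Chars.findFrom_natCast cs ['*', '/'] _ hkle] at he
      have hf : PySem.Chars.find (cs.drop ((PySem.Chars.find cs ['/', '*']).toNat + 2)) ['*', '/'] = -1 := by
        by_cases hf : PySem.Chars.find (cs.drop ((PySem.Chars.find cs ['/', '*']).toNat + 2)) ['*', '/'] = -1
        · exact hf
        · rw [if_neg hf] at he
          have := PySem.Chars.neg_one_le_find (cs.drop ((PySem.Chars.find cs ['/', '*']).toNat + 2)) ['*', '/']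
          omega
      rw [pv_goA_skip0 (PySem.Chars.find cs ['/', '*']).toNat cs [] (by omega)
        (fun j hj => by
          refine ⟨?_, hbspec.2 j hj⟩
          by_cases hl : PySem.Chars.find cs ['/', '/'] = -1
          · exact pv_no_prefix_of_find_neg cs _ hl j
          · have hl0 : 0 ≤ PySem.Chars.find cs ['/', '/'] := by
              have := PySem.Chars.neg_one_le_find cs ['/', '/']; omega
            exact (PySem.Chars.find_spec (s := cs) (sub := ['/', '/']) hl0).2 j
              (by have := hble hl; omega))]
      obtain ⟨t, ht⟩ := hbspec.1
      have htt : cs.drop ((PySem.Chars.find cs ['/', '*']).toNat + 2) = t := by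
        rw [← List.drop_drop, ← ht]; simp
      rw [← ht]
      show pvGoA ('/' :: '*' :: t) 0 _ = _
      simp only [pvGoA]
      rw [if_neg (by simp), if_pos ⟨trivial, trivial, rfl⟩, List.tail_cons]
      rw [pv_goA_all1 t _ (fun j => by
        rw [← htt]; exact pv_no_prefix_of_find_neg _ _ hf j)]
      rw [PySem.List.slice_to _ hbi0]
      simp
    · -- "/*" comes first and is closed: skip the block and continue after "*/"
      push Not at hline
      obtain ⟨hbi, hble⟩ := hline
      obtain ⟨hbi0, hkle⟩ := pv_find_block_bounds cs hbi
      have hbspec := PySem.Chars.find_spec (s := cs) (sub := ['/', '*']) hbi0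
      have hcast : PySem.Chars.find cs ['/', '*'] + 2
          = (((PySem.Chars.find cs ['/', '*']).toNat + 2 : Nat) : Int) := by omega
      rw [hcast, PySem.Chars.findFrom_natCast cs ['*', '/'] _ hkle] at he ⊢
      have hf : PySem.Chars.find (cs.drop ((PySem.Chars.find cs ['/', '*']).toNat + 2)) ['*', '/'] ≠ -1 := by
        intro hf; rw [if_pos hf] at he; exact he rfl
      rw [if_neg hf] at he ⊢
      have hf0 : 0 ≤ PySem.Chars.find (cs.drop ((PySem.Chars.find cs ['/', '*']).toNat + 2)) ['*', '/'] := by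
        have := PySem.Chars.neg_one_le_find (cs.drop ((PySem.Chars.find cs ['/', '*']).toNat + 2)) ['*', '/']
        omega
      have hfspec := PySem.Chars.find_spec
        (s := cs.drop ((PySem.Chars.find cs ['/', '*']).toNat + 2)) (sub := ['*', '/']) hf0
      have hflen := PySem.Chars.find_le_length
        (cs.drop ((PySem.Chars.find cs ['/', '*']).toNat + 2)) ['*', '/']
      rw [List.length_drop] at hflen
      rw [pv_goA_skip0 (PySem.Chars.find cs ['/', '*']).toNat cs [] (by omega)
        (fun j hj => by
          refine ⟨?_, hbspec.2 j hj⟩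
          by_cases hl : PySem.Chars.find cs ['/', '/'] = -1
          · exact pv_no_prefix_of_find_neg cs _ hl j
          · have hl0 : 0 ≤ PySem.Chars.find cs ['/', '/'] := by
              have := PySem.Chars.neg_one_le_find cs ['/', '/']; omega
            exact (PySem.Chars.find_spec (s := cs) (sub := ['/', '/']) hl0).2 j
              (by have := hble hl; omega))]
      obtain ⟨t, ht⟩ := hbspec.1
      have htt : cs.drop ((PySem.Chars.find cs ['/', '*']).toNat + 2) = t := by
        rw [← List.drop_drop, ← ht]; simp
      rw [← ht]
      show pvGoA ('/' :: '*' :: t) 0 _ = _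
      simp only [pvGoA]
      rw [if_neg (by simp), if_pos ⟨trivial, trivial, rfl⟩, List.tail_cons]
      rw [← htt,
          pv_goA_skip1 (PySem.Chars.find (cs.drop ((PySem.Chars.find cs ['/', '*']).toNat + 2)) ['*', '/']).toNat
            _ _ (by simp only [List.length_drop]; omega)
            (fun j hj => hfspec.2 j hj)]
      obtain ⟨u, hu⟩ := hfspec.1
      rw [← hu]
      show pvGoA ('*' :: '/' :: u) 1 _ = _
      simp only [pvGoA]
      rw [if_neg (by simp), if_neg (by simp), if_pos ⟨trivial, trivial, rfl⟩, List.tail_cons]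
      rw [pv_goA_acc,
            ih u (by
            have := congrArg List.length hu
            simp at this
            have hcl : 0 < cs.length := List.length_pos_iff.mpr hne
            omega)]
      have huu : u = cs.drop
          (((((PySem.Chars.find cs ['/', '*']).toNat + 2 : Nat) : Int))
            + PySem.Chars.find (cs.drop ((PySem.Chars.find cs ['/', '*']).toNat + 2)) ['*', '/'] + 2).toNat := by
        have h2 : u = List.drop 2
            (List.drop (PySem.Chars.find (cs.drop ((PySem.Chars.find cs ['/', '*']).toNat + 2)) ['*', '/']).toNat
              (cs.drop ((PySem.Chars.find cs ['/', '*']).toNat + 2))) := by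
          rw [← hu]; simp
        rw [h2, List.drop_drop, List.drop_drop]
        congr 1
        omega
      rw [PySem.List.slice_from _ (by omega), ← huu, PySem.List.slice_to _ hbi0]
      simp

theorem pv_main (cs : List Char) : pvGoA cs 0 [] = (pvGoB cs).flatten :=
  pv_main_aux cs.length cs le_rfl

-- ===== VERDICT (by name: the statement is the Claim_ definition above) =====
theorem remove_annotation_spec : Claim_equal_remove_annotation := by
  intro code _
  unfold Spec_remove_annotation remove_annotation remove_annotation_alt
  rw [pv_join_nil_flatten, pv_main]
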